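-- pv_equiv track=rewrite | github.com/carlhannes/boom | ai_agent/data/quality_metrics.py | _has_repeating_subsequence
-- ===== SOURCE A (Python) =====
-- def _has_repeating_subsequence(sequence, length: int) -> bool:
--     """Check if sequence contains repeating subsequences of given length"""
--     if len(sequence) < length * 2:
--         return False
--
--     for i in range(len(sequence) - length + 1):
--         pattern = sequence[i:i+length]
--         # Look for the same pattern later in the sequence
--         for j in range(i + length, len(sequence) - length + 1, length):
--             if sequence[j:j+length] == pattern:
--                 return True
--     return False
-- ===== SOURCE B (Python) =====
-- def _has_repeating_subsequence(sequence, length: int) -> bool: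
--     """Group window positions by residue mod length; a repeat in A's sense is a
--     duplicate window within one residue class, detected with a per-class set."""
--     n = len(sequence)
--     if n < length * 2:
--         return False
--     for r in range(length):
--         seen = set()
--         for pos in range(r, n - length + 1, length):
--             pat = tuple(sequence[pos:pos + length])
--             if pat in seen:
--                 return True
--             seen.add(pat)
--     return False
-- ===== Notes on version B (the rewrite author's own statement) =====
-- stated objective: alternative
-- what changed: Instead of A's scan, for every start i, of all later length-aligned windows, B groups window positions by residue mod length and detects a duplicate window within each residue class with a set, so each window is examined once (not measurably faster on the generated inputs, where A exits early).
import Mathlib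
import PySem

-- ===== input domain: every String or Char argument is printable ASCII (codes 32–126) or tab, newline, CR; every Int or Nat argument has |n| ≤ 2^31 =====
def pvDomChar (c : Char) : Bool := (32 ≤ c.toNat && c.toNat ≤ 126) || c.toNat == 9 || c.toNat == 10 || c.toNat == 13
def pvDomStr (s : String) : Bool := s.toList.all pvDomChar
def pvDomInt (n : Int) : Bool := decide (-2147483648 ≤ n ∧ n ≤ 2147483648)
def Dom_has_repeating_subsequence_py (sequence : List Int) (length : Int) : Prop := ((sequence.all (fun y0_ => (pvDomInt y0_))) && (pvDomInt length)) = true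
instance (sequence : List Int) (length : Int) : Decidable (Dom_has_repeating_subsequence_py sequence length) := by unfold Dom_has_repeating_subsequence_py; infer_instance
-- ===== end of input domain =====

-- B groups window positions by residue mod `length` and detects a duplicate window per
-- residue class with a set, instead of A's scan of all later aligned windows for every
-- start; equal return value on every input with length ≠ 0.

-- ===== PORT A =====
-- for i in range(len(sequence) - length + 1): pattern = sequence[i:i+length];
--   for j in range(i+length, len(sequence)-length+1, length): if sequence[j:j+length] == pattern: return True
def has_repeating_subsequence_py (sequence : List Int) (length : Int) : Bool :=
  if (sequence.length : Int) < length * 2 then false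
  else
    (PySem.List.pyRange 0 ((sequence.length : Int) - length + 1) 1).any (fun i =>
      (PySem.List.pyRange (i + length) ((sequence.length : Int) - length + 1) length).any (fun j =>
        PySem.List.slice sequence (some j) (some (j + length)) ==
          PySem.List.slice sequence (some i) (some (i + length))))

-- ===== PORT B =====
-- inner loop of Source B: for pos in range(r, n-length+1, length): pat = tuple(...);
--   if pat in seen: return True; seen.add(pat)
def pvScanB (sequence : List Int) (length : Int) : List Int → PySem.Set (List Int) → Bool
  | [], _ => false
  | pos :: rest, seen =>
    let pat := PySem.List.slice sequence (some pos) (some (pos + length))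
    if PySem.Set.contains seen pat then true
    else pvScanB sequence length rest (PySem.Set.add seen pat)

def has_repeating_subsequence_py_alt (sequence : List Int) (length : Int) : Bool :=
  if (sequence.length : Int) < length * 2 then false
  else
    (PySem.List.pyRange 0 length 1).any (fun r =>
      pvScanB sequence length
        (PySem.List.pyRange r ((sequence.length : Int) - length + 1) length)
        PySem.Set.empty)

-- ===== PRECONDITION & SPEC =====
-- Pre_ excludes only length = 0, on which A raises ValueError (range step zero).
def Pre_has_repeating_subsequence_py (sequence : List Int) (length : Int) : Prop := length ≠ 0
instance (sequence : List Int) (length : Int) : Decidable (Pre_has_repeating_subsequence_py sequence length) := by unfold Pre_has_repeating_subsequence_py; infer_instance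
def pvWitness_has_repeating_subsequence_py : List Int × Int := ([1, 2, 1, 2], 2)

def Spec_has_repeating_subsequence_py (sequence : List Int) (length : Int) (out : Bool) : Prop := out = has_repeating_subsequence_py_alt sequence length
instance (sequence : List Int) (length : Int) (out : Bool) : Decidable (Spec_has_repeating_subsequence_py sequence length out) := by unfold Spec_has_repeating_subsequence_py; infer_instance

-- ===== CLAIM (what is proved, stated in full; the proofs are below) =====
def Claim_equal_has_repeating_subsequence_py : Prop := ∀ (sequence : List Int) (length : Int), Dom_has_repeating_subsequence_py sequence length → Pre_has_repeating_subsequence_py sequence length → Spec_has_repeating_subsequence_py sequence length (has_repeating_subsequence_py sequence length)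

-- ===== LEMMAS AND PROOFS =====

-- the window of length `length` starting at position i
def pvWin (sequence : List Int) (length i : Int) : List Int :=
  PySem.List.slice sequence (some i) (some (i + length))

-- pvScanB on a duplicate-free position list returns true iff some window is in `seen`
-- or two distinct positions carry the same window.
theorem pvScanB_eq_true_iff (sequence : List Int) (length : Int) (ps : List Int)
    (seen : PySem.Set (List Int)) (hnd : ps.Nodup) :
    pvScanB sequence length ps seen = true ↔
      (∃ p ∈ ps, pvWin sequence length p ∈ seen) ∨
      (∃ p ∈ ps, ∃ q ∈ ps, p ≠ q ∧ pvWin sequence length p = pvWin sequence length q) := by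
  induction ps generalizing seen with
  | nil => simp [pvScanB]
  | cons p rest ih =>
    rcases List.nodup_cons.mp hnd with ⟨hp, hrest⟩
    by_cases hc : pvWin sequence length p ∈ seen
    · simp only [pvScanB]
      rw [if_pos (by simpa [PySem.Set.contains_iff, pvWin] using hc)]
      constructor
      · intro _; exact Or.inl ⟨p, List.mem_cons_self, hc⟩
      · intro _; rfl
    · simp only [pvScanB]
      rw [if_neg (by simpa [PySem.Set.contains_iff, pvWin] using hc)]
      rw [ih (PySem.Set.add seen (PySem.List.slice sequence (some p) (some (p + length)))) hrest]
      constructor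
      · rintro (⟨q, hq, hmem⟩ | ⟨a, ha, b, hb, hab, heq⟩)
        · rw [PySem.Set.mem_add] at hmem
          rcases hmem with hmem | hmem
          · exact Or.inl ⟨q, List.mem_cons_of_mem _ hq, hmem⟩
          · refine Or.inr ⟨p, List.mem_cons_self, q, List.mem_cons_of_mem _ hq, ?_, ?_⟩
            · rintro rfl; exact hp hq
            · simp only [pvWin] at hmem ⊢
              exact hmem.symm
        · exact Or.inr ⟨a, List.mem_cons_of_mem p ha, b, List.mem_cons_of_mem p hb, hab, heq⟩
      · rintro (⟨q, hq, hmem⟩ | ⟨a, ha, b, hb, hab, heq⟩)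
        · rcases List.mem_cons.mp hq with rfl | hq
          · exact absurd hmem hc
          · exact Or.inl ⟨q, hq, by rw [PySem.Set.mem_add]; exact Or.inl hmem⟩
        · rcases List.mem_cons.mp ha with rfl | ha2
          · rcases List.mem_cons.mp hb with rfl | hb2
            · exact absurd rfl hab
            · exact Or.inl ⟨b, hb2, by rw [PySem.Set.mem_add]; exact Or.inr (by simpa [pvWin] using heq.symm)⟩
          · rcases List.mem_cons.mp hb with rfl | hb2
            · exact Or.inl ⟨a, ha2, by rw [PySem.Set.mem_add]; exact Or.inr (by simpa [pvWin] using heq)⟩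
            · exact Or.inr ⟨a, ha2, b, hb2, hab, heq⟩

theorem pvNodup_pyRange_of_pos (a b s : Int) (hs : 0 < s) :
    (PySem.List.pyRange a b s).Nodup := by
  rw [PySem.List.pyRange_of_pos a b hs]
  refine (List.nodup_range).map ?_
  intro k k' h
  have h2 : a + s * (k : Int) = a + s * (k' : Int) := h
  have h3 := mul_left_cancel₀ (by omega : (s : Int) ≠ 0)
    (by omega : s * (k : Int) = s * (k' : Int))
  exact_mod_cast h3

-- two distinct positions in the same residue class, one an aligned later copy of the other,
-- give A's pair (i, j) and vice versa
theorem pvBridge (sequence : List Int) (length : Int) (hL : 0 < length) :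
    ((∃ i ∈ PySem.List.pyRange 0 ((sequence.length : Int) - length + 1) 1,
        ∃ j ∈ PySem.List.pyRange (i + length) ((sequence.length : Int) - length + 1) length,
          pvWin sequence length j = pvWin sequence length i) ↔
      (∃ r ∈ PySem.List.pyRange 0 length 1,
        ∃ p ∈ PySem.List.pyRange r ((sequence.length : Int) - length + 1) length,
        ∃ q ∈ PySem.List.pyRange r ((sequence.length : Int) - length + 1) length,
          p ≠ q ∧ pvWin sequence length p = pvWin sequence length q)) := by
  set N : Int := (sequence.length : Int) - length + 1 with hN
  constructor
  · rintro ⟨i, hi, j, hj, hw⟩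
    rw [PySem.List.mem_pyRange_one] at hi
    rw [PySem.List.mem_pyRange_iff_of_pos hL] at hj
    obtain ⟨hj1, hj2, k, hk⟩ := hj
    refine ⟨i % length, ?_, i, ?_, j, ?_, ?_, hw.symm⟩
    · rw [PySem.List.mem_pyRange_one]
      exact ⟨Int.emod_nonneg i (by omega), Int.emod_lt_of_pos i hL⟩
    · rw [PySem.List.mem_pyRange_iff_of_pos hL]
      have hdiv : length * (i / length) = i - i % length := by
        have := Int.mul_ediv_add_emod i length; omega
      have hq : 0 ≤ i / length := Int.ediv_nonneg (by omega) (by omega)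
      refine ⟨by nlinarith, hi.2, ⟨i / length, by omega⟩⟩
    · rw [PySem.List.mem_pyRange_iff_of_pos hL]
      have hdiv : length * (i / length) = i - i % length := by
        have := Int.mul_ediv_add_emod i length; omega
      have hq : 0 ≤ i / length := Int.ediv_nonneg (by omega) (by omega)
      refine ⟨by nlinarith, hj2, ⟨k + 1 + i / length, ?_⟩⟩
      rw [mul_add, mul_add, mul_one, hdiv]
      omega
    · omega
  · rintro ⟨r, hr, p, hp, q, hq, hne, hw⟩
    rw [PySem.List.mem_pyRange_one] at hr
    rw [PySem.List.mem_pyRange_iff_of_pos hL] at hp hq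
    obtain ⟨hp1, hp2, kp, hkp⟩ := hp
    obtain ⟨hq1, hq2, kq, hkq⟩ := hq
    rcases lt_or_gt_of_ne hne with hlt | hlt
    · refine ⟨p, ?_, q, ?_, hw.symm⟩
      · rw [PySem.List.mem_pyRange_one]; omega
      · rw [PySem.List.mem_pyRange_iff_of_pos hL]
        refine ⟨?_, hq2, ⟨kq - kp - 1, by rw [mul_sub, mul_sub, mul_one]; omega⟩⟩
        have : length ∣ q - p := ⟨kq - kp, by rw [mul_sub]; omega⟩
        have := Int.le_of_dvd (by omega) this
        omega
    · refine ⟨q, ?_, p, ?_, hw⟩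
      · rw [PySem.List.mem_pyRange_one]; omega
      · rw [PySem.List.mem_pyRange_iff_of_pos hL]
        refine ⟨?_, hp2, ⟨kp - kq - 1, by rw [mul_sub, mul_sub, mul_one]; omega⟩⟩
        have : length ∣ p - q := ⟨kp - kq, by rw [mul_sub]; omega⟩
        have := Int.le_of_dvd (by omega) this
        omega

-- ===== VERDICT (by name: the statement is the Claim_ definition above) =====
theorem has_repeating_subsequence_py_spec : Claim_equal_has_repeating_subsequence_py := by
  intro sequence length _ hPre
  unfold Spec_has_repeating_subsequence_py
  unfold has_repeating_subsequence_py has_repeating_subsequence_py_alt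
  by_cases hg : ((sequence.length : Int) < length * 2)
  · rw [if_pos hg, if_pos hg]
  · rw [if_neg hg, if_neg hg]
    rcases lt_or_gt_of_ne hPre with hL | hL
    · -- length < 0: A's inner ranges and B's outer range are empty
      have hB : PySem.List.pyRange 0 length 1 = [] :=
        PySem.List.pyRange_one_eq_nil (by omega)
      rw [hB]
      simp only [List.any_nil]
      rw [List.any_eq_false]
      intro i hi
      rw [PySem.List.mem_pyRange_one] at hi
      have hinner : PySem.List.pyRange (i + length) ((sequence.length : Int) - length + 1) length = [] := by
        rw [PySem.List.pyRange_of_neg _ _ hL, if_neg (by omega)]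
        simp
      rw [hinner]
      simp
    · -- length > 0: both sides characterise the same duplicated aligned window
      have hA : (PySem.List.pyRange 0 ((sequence.length : Int) - length + 1) 1).any (fun i =>
          (PySem.List.pyRange (i + length) ((sequence.length : Int) - length + 1) length).any (fun j =>
            PySem.List.slice sequence (some j) (some (j + length)) ==
              PySem.List.slice sequence (some i) (some (i + length)))) = true ↔
          (∃ i ∈ PySem.List.pyRange 0 ((sequence.length : Int) - length + 1) 1,
            ∃ j ∈ PySem.List.pyRange (i + length) ((sequence.length : Int) - length + 1) length,
              pvWin sequence length j = pvWin sequence length i) := by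
        simp [List.any_eq_true, pvWin]
      have hBc : (PySem.List.pyRange 0 length 1).any (fun r =>
          pvScanB sequence length
            (PySem.List.pyRange r ((sequence.length : Int) - length + 1) length)
            PySem.Set.empty) = true ↔
          (∃ r ∈ PySem.List.pyRange 0 length 1,
            ∃ p ∈ PySem.List.pyRange r ((sequence.length : Int) - length + 1) length,
            ∃ q ∈ PySem.List.pyRange r ((sequence.length : Int) - length + 1) length,
              p ≠ q ∧ pvWin sequence length p = pvWin sequence length q) := by
        rw [List.any_eq_true]
        constructor
        · rintro ⟨r, hr, hscan⟩
          rcases (pvScanB_eq_true_iff sequence length _ PySem.Set.empty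
              (pvNodup_pyRange_of_pos _ _ _ hL)).mp hscan with ⟨p, _, hmem⟩ | hdup
          · simp [PySem.Set.empty] at hmem
          · exact ⟨r, hr, hdup⟩
        · rintro ⟨r, hr, hdup⟩
          refine ⟨r, hr, (pvScanB_eq_true_iff sequence length _ PySem.Set.empty
              (pvNodup_pyRange_of_pos _ _ _ hL)).mpr (Or.inr hdup)⟩
      rw [Bool.eq_iff_iff, hA, hBc]
      exact pvBridge sequence length hL
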